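-- pv_equiv track=rewrite | github.com/expyriment/expyriment | expyriment/design/permute/_permute.py | _balanced_latin_square_sequence
-- ===== SOURCE A (Python) =====
-- def _balanced_latin_square_sequence(n_elements, row):
--     """helper function: creates a sequence for a balanced latin square
--
--     Based on "Bradley, J. V. Complete counterbalancing of immediate sequential effects in a Latin square design. J. Amer. Statist. Ass.,.1958, 53, 525-528. "
--     """
--
--     result = []
--     j = 0
--     h = 0
--
--     for i in range(n_elements):
--         if i < 2 or i % 2 != 0:
--             val = j
--             j += 1
--         else:
--             val = n_elements - h - 1
--             h += 1
--
--         result.append((val + row) % n_elements)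
--
--     if n_elements % 2 != 0 and row % 2 != 0:
--         return list(reversed(result))
--     else:
--         return result
-- ===== SOURCE B (Python) =====
-- def _balanced_latin_square_sequence(n_elements, row):
--     """helper function: creates a sequence for a balanced latin square
--
--     Staged construction: interleave an ascending run 1..n//2 with a
--     descending run n-1..n//2+1 after a leading 0, then shift by row.
--     """
--     ups = list(range(1, n_elements // 2 + 1))
--     downs = list(range(n_elements - 1, n_elements // 2, -1))
--     base = [0]
--     for u, d in zip(ups, downs):
--         base.append(u)
--         base.append(d)
--     if len(ups) > len(downs):
--         base.append(ups[-1])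
--     base = base[:n_elements]
--     seq = [(v + row) % n_elements for v in base]
--     if n_elements % 2 != 0 and row % 2 != 0:
--         seq.reverse()
--     return seq
-- ===== Notes on version B (the rewrite author's own statement) =====
-- stated objective: alternative
-- what changed: Instead of one loop with running j/h accumulators and a parity branch, B builds the ascending run 1..n//2 and the descending run n-1..n//2+1 as two explicit ranges, interleaves them behind a leading 0 via zip (appending the odd one out), then shifts by row in a separate pass.
import Mathlib
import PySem

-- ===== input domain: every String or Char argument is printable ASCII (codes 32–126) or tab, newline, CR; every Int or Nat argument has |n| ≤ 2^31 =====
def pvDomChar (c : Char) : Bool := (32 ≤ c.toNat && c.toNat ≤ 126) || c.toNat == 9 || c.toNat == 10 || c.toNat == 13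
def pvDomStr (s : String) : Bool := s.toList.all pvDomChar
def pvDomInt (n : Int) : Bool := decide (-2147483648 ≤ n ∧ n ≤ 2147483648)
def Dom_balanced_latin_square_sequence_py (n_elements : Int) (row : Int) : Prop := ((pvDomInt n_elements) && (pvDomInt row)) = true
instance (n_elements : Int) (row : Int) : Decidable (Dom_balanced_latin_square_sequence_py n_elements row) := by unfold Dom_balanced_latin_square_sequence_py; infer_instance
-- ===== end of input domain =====

-- B builds the ascending and descending runs as two explicit ranges and interleaves
-- them behind a leading 0 (zip + odd-one-out), instead of A's single accumulator loop.

-- ===== PORT A =====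
-- loop body: state (result, j, h)
def pvStepA (n_elements row : Int) (s : List Int × Int × Int) (i : Int) : List Int × Int × Int :=
  if i < 2 ∨ PySem.Int.mod i 2 ≠ 0 then
    (s.1 ++ [PySem.Int.mod (s.2.1 + row) n_elements], s.2.1 + 1, s.2.2)
  else
    (s.1 ++ [PySem.Int.mod (n_elements - s.2.2 - 1 + row) n_elements], s.2.1, s.2.2 + 1)

-- the 'result' list right before A's final reversal branch
def pvSeqA (n_elements row : Int) : List Int :=
  ((PySem.List.pyRange 0 n_elements 1).foldl (pvStepA n_elements row) ([], 0, 0)).1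

def balanced_latin_square_sequence_py (n_elements : Int) (row : Int) : List Int :=
  if PySem.Int.mod n_elements 2 ≠ 0 ∧ PySem.Int.mod row 2 ≠ 0 then
    (pvSeqA n_elements row).reverse
  else
    pvSeqA n_elements row

-- ===== PORT B =====
-- B's 'seq' right before the final reversal branch: two ranges, interleaved behind a
-- leading 0 via zip (appending the odd one out), truncated, then shifted by row.
-- ups[-1] is ported as (pyGet? ups (-1)).getD 0; the branch guard makes ups nonempty
-- there, so the default is never used (Python would raise only on empty ups).
def pvSeqB (n_elements row : Int) : List Int :=
  let ups := PySem.List.pyRange 1 (PySem.Int.floordiv n_elements 2 + 1) 1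
  let downs := PySem.List.pyRange (n_elements - 1) (PySem.Int.floordiv n_elements 2) (-1)
  let base0 := (ups.zip downs).foldl (fun acc p => acc ++ [p.1, p.2]) [0]
  let base1 := if downs.length < ups.length
    then base0 ++ [(PySem.List.pyGet? ups (-1)).getD 0]
    else base0
  let base := PySem.List.slice base1 none (some n_elements)
  base.map (fun v => PySem.Int.mod (v + row) n_elements)

def balanced_latin_square_sequence_py_alt (n_elements : Int) (row : Int) : List Int :=
  if PySem.Int.mod n_elements 2 ≠ 0 ∧ PySem.Int.mod row 2 ≠ 0 then
    (pvSeqB n_elements row).reverse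
  else
    pvSeqB n_elements row

-- ===== PRECONDITION & SPEC =====
def Spec_balanced_latin_square_sequence_py (n_elements : Int) (row : Int) (out : List Int) : Prop := out = balanced_latin_square_sequence_py_alt n_elements row
instance (n_elements : Int) (row : Int) (out : List Int) : Decidable (Spec_balanced_latin_square_sequence_py n_elements row out) := by unfold Spec_balanced_latin_square_sequence_py; infer_instance

-- ===== CLAIM =====
def Claim_equal_balanced_latin_square_sequence_py : Prop := ∀ (n_elements : Int) (row : Int), Dom_balanced_latin_square_sequence_py n_elements row → Spec_balanced_latin_square_sequence_py n_elements row (balanced_latin_square_sequence_py n_elements row)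

-- ===== LEMMAS AND PROOFS =====

-- the value A places at position i (proof-side characterisation)
def pvValB (n row i : Int) : Int :=
  PySem.Int.mod
    ((if PySem.Int.mod i 2 ≠ 0 then PySem.Int.floordiv (i + 1) 2
      else n - PySem.Int.floordiv i 2) + row) n

-- closed forms of A's accumulators after k iterations
def pvJ (k : Nat) : Int := (k : Int) / 2 + min (k : Int) 1
def pvH (k : Nat) : Int := max (((k : Int) + 1) / 2 - 1) 0

lemma pvLoopA (n_elements row : Int) :
    ∀ (k : Nat), (k : Int) ≤ n_elements →
      List.foldl (pvStepA n_elements row) ([], 0, 0) (List.map (fun m : Nat => (m : Int)) (List.range k))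
        = (List.map (fun m : Nat => pvValB n_elements row (m : Int)) (List.range k), pvJ k, pvH k) := by
  intro k
  induction k with
  | zero => intro _; simp [pvJ, pvH]
  | succ k ih =>
    intro h
    have hn : 0 < n_elements := by push_cast at h; omega
    have hk : (k : Int) ≤ n_elements := by push_cast at h ⊢; omega
    rw [List.range_succ]
    simp only [List.map_append, List.foldl_append, ih hk, List.map_cons, List.map_nil,
      List.foldl_cons, List.foldl_nil]
    unfold pvStepA pvValB
    simp only [PySem.Int.mod_eq_emod_of_pos (show (0:Int) < 2 by norm_num),
        PySem.Int.mod_eq_emod_of_pos hn, PySem.Int.mod_eq_emod_of_pos hn,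
        PySem.Int.floordiv_eq_ediv_of_pos (show (0:Int) < 2 by norm_num)]
    by_cases hk0 : k = 0
    · subst hk0
      norm_num [pvJ, pvH]
    · by_cases hodd : ((k : Int)) % 2 ≠ 0
      · have hcond : ((k : Int) < 2 ∨ ((k : Int)) % 2 ≠ 0) := Or.inr hodd
        rw [if_pos hcond, if_pos hodd]
        have e1 : pvJ k = ((k : Int) + 1) / 2 := by simp only [pvJ]; omega
        have e2 : pvJ (k + 1) = pvJ k + 1 := by simp only [pvJ]; omega
        have e3 : pvH (k + 1) = pvH k := by simp only [pvH]; omega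
        rw [e2, e3, e1]
      · push_neg at hodd
        have hge : 2 ≤ k := by omega
        have hk2 : ¬ ((k : Int) < 2 ∨ ((k : Int)) % 2 ≠ 0) := by
          push_neg
          exact ⟨by push_cast; omega, hodd⟩
        rw [if_neg hk2, if_neg (by simpa using hodd)]
        have f1 : n_elements - pvH k - 1 = n_elements - (k : Int) / 2 := by simp only [pvH]; omega
        have f2 : pvJ (k + 1) = pvJ k := by simp only [pvJ]; omega
        have f3 : pvH (k + 1) = pvH k + 1 := by simp only [pvH]; omega
        rw [f2, f3, f1]

lemma pvSeqA_eq (n_elements row : Int) (hn : 0 < n_elements) :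
    pvSeqA n_elements row
      = List.map (fun m : Nat => pvValB n_elements row (m : Int)) (List.range n_elements.toNat) := by
  unfold pvSeqA
  rw [PySem.List.pyRange_one]
  have hsz : (((n_elements - 0).toNat : Int)) ≤ n_elements := by omega
  simp only [zero_add]
  rw [pvLoopA n_elements row _ hsz]
  simp

lemma pvSeqA_nil (n_elements row : Int) (hn : n_elements ≤ 0) :
    pvSeqA n_elements row = [] := by
  unfold pvSeqA
  rw [PySem.List.pyRange_one_eq_nil (by omega)]
  rfl

lemma pvRangeOdd (F : Nat → Int) (k : Nat) :
    List.map F (List.range (2*k+1))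
      = F 0 :: (List.range k).flatMap (fun m => [F (2*m+1), F (2*m+2)]) := by
  induction k with
  | zero => simp
  | succ k ih =>
    have h1 : 2*(k+1)+1 = (2*k+1) + 1 + 1 := by ring
    rw [h1, List.range_succ, List.range_succ, List.map_append, List.map_append, ih,
      List.range_succ, List.flatMap_append]
    simp

lemma pvRangeEven (F : Nat → Int) (k : Nat) :
    List.map F (List.range (2*k+2))
      = F 0 :: ((List.range k).flatMap (fun m => [F (2*m+1), F (2*m+2)]) ++ [F (2*k+1)]) := by
  have h1 : 2*k+2 = (2*k+1) + 1 := by ring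
  rw [h1, List.range_succ, List.map_append, pvRangeOdd]
  simp

lemma pvSeqB_nil (n row : Int) (hn : n ≤ 0) :
    pvSeqB n row = [] := by
  simp only [pvSeqB]
  have hf : PySem.Int.floordiv n 2 = n / 2 :=
    PySem.Int.floordiv_eq_ediv_of_pos (by norm_num)
  rw [hf, PySem.List.pyRange_one_eq_nil (by omega), PySem.List.pyRange_neg_one_eq_nil (by omega)]
  simp only [List.zip_nil_left, List.foldl_nil, List.length_nil, lt_irrefl, if_false]
  rcases eq_or_lt_of_le hn with h0 | h0
  · subst h0
    rw [PySem.List.slice_to _ (le_refl (0:Int))]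
    simp
  · have hk : n = -(((-n).toNat : Nat) : Int) := by omega
    have hkpos : 0 < (-n).toNat := by omega
    rw [hk, PySem.List.slice_to_neg_natCast _ _ hkpos]
    have h1 : (1 : Nat) - (-n).toNat = 0 := by omega
    simp [h1]

lemma pvHeadVal (n row : Int) (hn : 0 < n) :
    PySem.Int.mod (0 + row) n = pvValB n row 0 := by
  unfold pvValB
  rw [PySem.Int.mod_eq_emod_of_pos hn, PySem.Int.mod_eq_emod_of_pos hn]
  norm_num [PySem.Int.mod, PySem.Int.floordiv]

lemma pvOddVal (n row : Int) (j : Nat) :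
    PySem.Int.mod (1 + (j:Int) + row) n = pvValB n row (2*(j:Int)+1) := by
  unfold pvValB
  rw [if_pos (by rw [PySem.Int.mod_eq_emod_of_pos (by norm_num : (0:Int) < 2)]; omega)]
  rw [PySem.Int.floordiv_eq_ediv_of_pos (by norm_num : (0:Int) < 2)]
  congr 1
  omega

lemma pvEvenVal (n row : Int) (j : Nat) :
    PySem.Int.mod (n - 1 - (j:Int) + row) n = pvValB n row (2*(j:Int)+2) := by
  unfold pvValB
  rw [if_neg (by rw [PySem.Int.mod_eq_emod_of_pos (by norm_num : (0:Int) < 2)]; omega)]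
  rw [PySem.Int.floordiv_eq_ediv_of_pos (by norm_num : (0:Int) < 2)]
  congr 1
  omega

lemma pvSeqB_eq (n row : Int) (hn : 0 < n) :
    pvSeqB n row
      = List.map (fun m : Nat => pvValB n row (m : Int)) (List.range n.toNat) := by
  obtain ⟨k, hk⟩ : ∃ k, n.toNat = 2*k+1 ∨ n.toNat = 2*k+2 := by
    rcases Nat.even_or_odd n.toNat with ⟨j,hj⟩|⟨j,hj⟩
    · exact ⟨j-1, Or.inr (by omega)⟩
    · exact ⟨j, Or.inl (by omega)⟩
  simp only [pvSeqB]
  rcases hk with hk | hk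
  · -- odd, n = 2k+1
    have hni : n = 2*(k:Int)+1 := by omega
    have hf : PySem.Int.floordiv n 2 = (k:Int) := by
      rw [PySem.Int.floordiv_eq_ediv_of_pos (by norm_num : (0:Int) < 2)]; omega
    rw [hf, PySem.List.pyRange_one, PySem.List.pyRange_neg_one]
    have h1 : ((k:Int) + 1 - 1).toNat = k := by omega
    have h2 : (n - 1 - (k:Int)).toNat = k := by omega
    rw [h1, h2, List.zip_map',
      PySem.List.foldl_append_eq_flatMap (fun p : Int × Int => [p.1, p.2])]
    rw [if_neg (by simp)]
    rw [PySem.List.slice_to _ (by omega : (0:Int) ≤ n)]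
    rw [List.take_of_length_le (by simp [List.length_flatMap, Function.comp_def]; omega)]
    rw [hk, pvRangeOdd (fun m : Nat => pvValB n row (m:Int)) k]
    simp only [List.flatMap_map, List.map_flatMap, List.map_cons, List.map_nil,
      List.cons_append, List.nil_append]
    congr 1
    · simpa using pvHeadVal n row hn
    · refine congrFun (congrArg _ (funext fun j => ?_)) _
      simp [pvOddVal, pvEvenVal]
  · -- even, n = 2k+2
    have hni : n = 2*(k:Int)+2 := by omega
    have hf : PySem.Int.floordiv n 2 = (k:Int)+1 := by
      rw [PySem.Int.floordiv_eq_ediv_of_pos (by norm_num : (0:Int) < 2)]; omega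
    rw [hf, PySem.List.pyRange_one, PySem.List.pyRange_neg_one]
    have h1 : ((k:Int) + 1 + 1 - 1).toNat = k + 1 := by omega
    have h2 : (n - 1 - ((k:Int)+1)).toNat = k := by omega
    rw [h1, h2, List.range_succ, List.map_append]
    simp only [List.map_cons, List.map_nil]
    rw [show (List.map (fun x : Nat => n - 1 - (x:Int)) (List.range k))
          = List.map (fun x : Nat => n - 1 - (x:Int)) (List.range k) ++ [] from (List.append_nil _).symm]
    rw [List.zip_append (by simp), List.zip_map', List.zip_nil_right, List.append_nil, List.append_nil,
      PySem.List.foldl_append_eq_flatMap (fun p : Int × Int => [p.1, p.2])]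
    rw [if_pos (by simp), PySem.List.pyGet?_neg_one_append_singleton, Option.getD_some]
    rw [PySem.List.slice_to _ (by omega : (0:Int) ≤ n)]
    rw [List.take_of_length_le (by simp [List.length_flatMap, Function.comp_def]; omega)]
    rw [hk, pvRangeEven (fun m : Nat => pvValB n row (m:Int)) k]
    simp only [List.flatMap_map, List.map_append, List.map_flatMap, List.map_cons, List.map_nil,
      List.cons_append, List.nil_append]
    congr 1
    · simpa using pvHeadVal n row hn
    · congr 1
      · refine congrFun (congrArg _ (funext fun j => ?_)) _
        simp [pvOddVal, pvEvenVal]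
      · simpa using pvOddVal n row k

lemma pvSeq_eq (n_elements row : Int) : pvSeqA n_elements row = pvSeqB n_elements row := by
  by_cases hn : 0 < n_elements
  · rw [pvSeqA_eq _ _ hn, pvSeqB_eq _ _ hn]
  · rw [pvSeqA_nil _ _ (by omega), pvSeqB_nil _ _ (by omega)]

-- ===== VERDICT =====
theorem balanced_latin_square_sequence_py_spec : Claim_equal_balanced_latin_square_sequence_py := by
  intro n_elements row _
  unfold Spec_balanced_latin_square_sequence_py
  unfold balanced_latin_square_sequence_py balanced_latin_square_sequence_py_alt
  rw [pvSeq_eq]
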